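-- pv_equiv track=rewrite | github.com/GrootBeard/ObjectTracker | tracking/filters/jpdaf.py | _generate_tau_i_events
-- ===== SOURCE A (Python) =====
-- def _generate_tau_i_events(t_index, mt_index, assignments) -> list[list[int]]:
--     M = assignments.copy()
--     M.pop(t_index)
--     u = [] if mt_index == 0 else [mt_index]
--     if 0 in u:
--         u.remove(0)
--
--     events = []
--     _enumerate_events(M, events, u, [])
--
--     for e in events:
--         e.insert(t_index, mt_index)
--
--     return events
--
-- def _enumerate_events(M, E, u, v, d=0) -> None:
--     if d == len(M):
--         E.append(v)
--         return
--
--     for i in M[d]: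
--         if i not in u:
--             vnew = v.copy()
--             vnew.append(i)
--             unew = u.copy()
--             # feasible events can have multiple tracks with no measurement assigned
--             if i != 0:
--                 unew.append(i)
--             _enumerate_events(M, E, unew, vnew, d+1)
-- ===== SOURCE B (Python) =====
-- def _generate_tau_i_events(t_index, mt_index, assignments) -> list[list[int]]:
--     M = assignments.copy()
--     M.pop(t_index)
--     # iterative breadth-first enumeration: worklist of (partial event, used measurements)
--     partials = [([], set() if mt_index == 0 else {mt_index})]
--     for row in M:
--         partials = [(v + [i], u | ({i} - {0}))
--                     for (v, u) in partials
--                     for i in row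
--                     if i not in u]
--     events = []
--     for v, _ in partials:
--         v.insert(t_index, mt_index)
--         events.append(v)
--     return events
-- ===== Notes on version B (the rewrite author's own statement) =====
-- stated objective: alternative
-- what changed: Replaces the recursive DFS helper with mutable accumulator by an iterative breadth-first worklist: one pass per row rebuilds the list of (partial event, used-measurement set) pairs, so the events come out in the same order without recursion.
import Mathlib
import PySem

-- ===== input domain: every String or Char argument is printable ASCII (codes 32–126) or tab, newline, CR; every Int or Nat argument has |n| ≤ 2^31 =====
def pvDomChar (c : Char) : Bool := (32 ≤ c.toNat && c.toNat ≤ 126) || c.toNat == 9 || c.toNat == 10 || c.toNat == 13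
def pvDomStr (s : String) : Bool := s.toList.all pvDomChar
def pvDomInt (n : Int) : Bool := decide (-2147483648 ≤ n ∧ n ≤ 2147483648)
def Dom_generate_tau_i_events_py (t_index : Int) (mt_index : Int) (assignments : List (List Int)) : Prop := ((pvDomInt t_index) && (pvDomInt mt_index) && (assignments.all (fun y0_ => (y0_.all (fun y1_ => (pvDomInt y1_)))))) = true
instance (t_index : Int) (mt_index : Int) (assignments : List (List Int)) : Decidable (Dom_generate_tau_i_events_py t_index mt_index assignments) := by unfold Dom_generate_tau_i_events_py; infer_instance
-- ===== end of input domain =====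

-- B replaces A's recursive DFS helper by an iterative breadth-first worklist over the rows (alternative decomposition, same cost).

-- ===== PORT A =====
-- recursive DFS of A's _enumerate_events; E-appends in DFS order become list concatenation
def pvEnumA : List (List Int) → List Int → List Int → List (List Int)
  | [], _, v => [v]
  | row :: rest, u, v =>
      row.flatMap (fun i =>
        if i ∈ u then []
        else pvEnumA rest (if i ≠ 0 then u ++ [i] else u) (v ++ [i]))

def generate_tau_i_events_py (t_index : Int) (mt_index : Int) (assignments : List (List Int)) : List (List Int) :=
  match PySem.List.pop? assignments t_index with
  | none => []   -- M.pop(t_index) raises IndexError; excluded by Pre_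
  | some (_, M) =>
    let u : List Int := if mt_index = 0 then [] else [mt_index]
    let u : List Int := if (0:Int) ∈ u then (PySem.List.remove? u 0).getD u else u
    let events := pvEnumA M u []
    events.map (fun e => PySem.List.insert e t_index mt_index)

-- ===== PORT B =====
-- one BFS round: extend every partial with every feasible measurement of this row
def pvStepB (partials : List (List Int × PySem.Set Int)) (row : List Int) : List (List Int × PySem.Set Int) :=
  partials.flatMap (fun p =>
    row.filterMap (fun i =>
      if i ∈ p.2 then none
      else some (p.1 ++ [i], if i = 0 then p.2 else PySem.Set.add p.2 i)))

def generate_tau_i_events_py_alt (t_index : Int) (mt_index : Int) (assignments : List (List Int)) : List (List Int) :=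
  match PySem.List.pop? assignments t_index with
  | none => []   -- M.pop(t_index) raises IndexError; excluded by Pre_
  | some (_, M) =>
    let partials := M.foldl pvStepB [(([] : List Int), if mt_index = 0 then PySem.Set.empty else PySem.Set.ofList [mt_index])]
    partials.foldl (fun events p => events ++ [PySem.List.insert p.1 t_index mt_index]) []

-- ===== PRECONDITION & SPEC =====
-- Pre_ excludes exactly the inputs where assignments.pop(t_index) raises IndexError (t_index out of range).
def Pre_generate_tau_i_events_py (t_index : Int) (mt_index : Int) (assignments : List (List Int)) : Prop :=
  PySem.Raise.InRange assignments.length t_index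
instance (t_index : Int) (mt_index : Int) (assignments : List (List Int)) : Decidable (Pre_generate_tau_i_events_py t_index mt_index assignments) := by unfold Pre_generate_tau_i_events_py; infer_instance

def pvWitness_generate_tau_i_events_py : Int × Int × List (List Int) := (0, 1, [[0, 1], [0, 1, 2]])

def Spec_generate_tau_i_events_py (t_index : Int) (mt_index : Int) (assignments : List (List Int)) (out : List (List Int)) : Prop := out = generate_tau_i_events_py_alt t_index mt_index assignments
instance (t_index : Int) (mt_index : Int) (assignments : List (List Int)) (out : List (List Int)) : Decidable (Spec_generate_tau_i_events_py t_index mt_index assignments out) := by unfold Spec_generate_tau_i_events_py; infer_instance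

-- ===== CLAIM (what is proved, stated in full; the proofs are below) =====
def Claim_equal_generate_tau_i_events_py : Prop := ∀ (t_index : Int) (mt_index : Int) (assignments : List (List Int)), Dom_generate_tau_i_events_py t_index mt_index assignments → Pre_generate_tau_i_events_py t_index mt_index assignments → Spec_generate_tau_i_events_py t_index mt_index assignments (generate_tau_i_events_py t_index mt_index assignments)

-- ===== LEMMAS AND PROOFS =====
theorem pvStepB_append (ps qs : List (List Int × PySem.Set Int)) (row : List Int) :
    pvStepB (ps ++ qs) row = pvStepB ps row ++ pvStepB qs row := by
  simp [pvStepB]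

theorem pvRun_append (M : List (List Int)) (ps qs : List (List Int × PySem.Set Int)) :
    M.foldl pvStepB (ps ++ qs) = M.foldl pvStepB ps ++ M.foldl pvStepB qs := by
  induction M generalizing ps qs with
  | nil => simp
  | cons row rest ih => simp [List.foldl_cons, pvStepB_append, ih]

theorem pvRun_nil (M : List (List Int)) : M.foldl pvStepB [] = [] := by
  induction M with
  | nil => rfl
  | cons row rest ih => simpa [pvStepB] using ih

theorem pvRun_cons (M : List (List Int)) (p : List Int × PySem.Set Int) (ps : List (List Int × PySem.Set Int)) :
    M.foldl pvStepB (p :: ps) = M.foldl pvStepB [p] ++ M.foldl pvStepB ps := by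
  simpa using pvRun_append M [p] ps

theorem pvPop?_isSome {α : Type} (xs : List α) (i : Int)
    (h : PySem.Raise.InRange xs.length i) : (PySem.List.pop? xs i).isSome := by
  obtain ⟨h1, h2⟩ := h
  unfold PySem.List.pop? PySem.List.pyIdx?
  by_cases h0 : 0 ≤ i
  · have hlt : i.toNat < xs.length := by omega
    simp [h0, h2, hlt]
  · have hlt : xs.length - (-i).toNat < xs.length := by omega
    simp [h0, h1, hlt]

theorem pvMain (M : List (List Int)) (v ul : List Int) (us : PySem.Set Int)
    (h : ∀ i : Int, i ∈ ul ↔ i ∈ us) :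
    (M.foldl pvStepB [(v, us)]).map Prod.fst = pvEnumA M ul v := by
  induction M generalizing v ul us with
  | nil => simp [pvEnumA]
  | cons row rest ih =>
    simp only [List.foldl_cons, pvEnumA]
    have hstep : pvStepB [(v, us)] row
        = row.filterMap (fun i =>
            if i ∈ us then none
            else some (v ++ [i], if i = 0 then us else PySem.Set.add us i)) := by
      simp [pvStepB]
    rw [hstep]; clear hstep
    induction row with
    | nil => simp [pvRun_nil]
    | cons i row' ihrow =>
      by_cases hiu : i ∈ ul
      · have hius : i ∈ us := (h i).mp hiu
        simpa [List.filterMap_cons, hius, hiu] using ihrow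
      · have hius : i ∉ us := fun hx => hiu ((h i).mpr hx)
        -- the two used-measurement containers agree in membership
        have h' : ∀ j : Int, j ∈ (if i ≠ 0 then ul ++ [i] else ul) ↔
            j ∈ (if i = 0 then us else PySem.Set.add us i) := by
          intro j
          by_cases hi0 : i = 0
          · simp [hi0, h j]
          · simp [hi0, PySem.Set.mem_add, h j, or_comm]
        have hred : (List.filterMap (fun j => if j ∈ us then none
              else some (v ++ [j], if j = 0 then us else PySem.Set.add us j)) (i :: row'))
            = (v ++ [i], if i = 0 then us else PySem.Set.add us i) ::
              List.filterMap (fun j => if j ∈ us then none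
              else some (v ++ [j], if j = 0 then us else PySem.Set.add us j)) row' := by
          simp [hius]
        rw [hred, pvRun_cons, List.map_append, ih _ _ _ h', ihrow]
        simp [List.flatMap_cons, hiu]

theorem pvFoldl_append_map {α β : Type} (h : α → β) :
    ∀ (l : List α) (acc : List β), l.foldl (fun ev p => ev ++ [h p]) acc = acc ++ l.map h := by
  intro l
  induction l with
  | nil => simp
  | cons x xs ih => intro acc; simp [ih]

-- ===== VERDICT (by name: the statement is the Claim_ definition above) =====
theorem generate_tau_i_events_py_spec : Claim_equal_generate_tau_i_events_py := by
  intro t mt assignments _ hpre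
  unfold Spec_generate_tau_i_events_py generate_tau_i_events_py generate_tau_i_events_py_alt
  cases hp : PySem.List.pop? assignments t with
  | none =>
    exfalso
    have := pvPop?_isSome assignments t hpre
    rw [hp] at this
    simp at this
  | some r =>
    obtain ⟨x, M⟩ := r
    simp only
    have hul : (if (0:Int) ∈ (if mt = 0 then ([]:List Int) else [mt]) then
        (PySem.List.remove? (if mt = 0 then ([]:List Int) else [mt]) 0).getD (if mt = 0 then ([]:List Int) else [mt])
        else (if mt = 0 then ([]:List Int) else [mt])) = (if mt = 0 then ([]:List Int) else [mt]) := by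
      by_cases h0 : mt = 0
      · simp [h0]
      · simp [h0]
        intro h
        exact absurd h.symm h0
    have hmem : ∀ i : Int, i ∈ (if mt = 0 then ([]:List Int) else [mt]) ↔
        i ∈ (if mt = 0 then PySem.Set.empty else PySem.Set.ofList [mt]) := by
      intro i; by_cases h0 : mt = 0 <;> simp [h0, PySem.Set.empty, PySem.Set.ofList, PySem.Set.add]
    rw [hul, pvFoldl_append_map, List.nil_append,
        ← pvMain M [] _ _ hmem, List.map_map]
    rfl
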